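-- pv_equiv track=rewrite | github.com/gthgomez/MonteCarlo-Ledger | monte_carlo_ledger/forecasting.py | calculate_forecast_summary
-- ===== SOURCE A (Python) =====
-- from typing import Dict, List
--
-- def calculate_forecast_summary(balance_cents: int, forecast_rows: List[Dict]) -> Dict:
--     """Computes summary metrics for a generated forecast."""
--     lowest_balance = balance_cents
--     lowest_balance_date = None
--     first_negative_date = None
--     ending_balance = balance_cents
--
--     for row in forecast_rows:
--         cur_bal = row["balance_after"]
--         ending_balance = cur_bal
--
--         if cur_bal < lowest_balance:
--             lowest_balance = cur_bal
--             lowest_balance_date = row["date"]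
--
--         if first_negative_date is None and cur_bal < 0:
--             first_negative_date = row["date"]
--
--     return {
--         "starting_balance": balance_cents,
--         "lowest_balance": lowest_balance,
--         "lowest_balance_date": lowest_balance_date,
--         "ending_balance": ending_balance,
--         "first_negative_date": first_negative_date,
--     }
-- ===== SOURCE B (Python) =====
-- def calculate_forecast_summary(balance_cents, forecast_rows):
--     """Same summary via three independent standard-library queries instead of one accumulator loop."""
--     ending_balance = forecast_rows[-1]["balance_after"] if forecast_rows else balance_cents
--     first_negative_date = next((r["date"] for r in forecast_rows if r["balance_after"] < 0), None)
--     lowest_balance = balance_cents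
--     lowest_balance_date = None
--     if forecast_rows:
--         best = min(forecast_rows, key=lambda r: r["balance_after"])
--         if best["balance_after"] < balance_cents:
--             lowest_balance = best["balance_after"]
--             lowest_balance_date = best["date"]
--     return {
--         "starting_balance": balance_cents,
--         "lowest_balance": lowest_balance,
--         "lowest_balance_date": lowest_balance_date,
--         "ending_balance": ending_balance,
--         "first_negative_date": first_negative_date,
--     }
-- ===== Notes on version B (the rewrite author's own statement) =====
-- stated objective: idiomatic
-- what changed: The single accumulator loop threading four state variables is replaced by three independent standard-library queries: ending balance from the last row, first negative date via next() over a generator, and the lowest balance via min(..., key=...) compared once against the starting balance.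
import Mathlib
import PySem

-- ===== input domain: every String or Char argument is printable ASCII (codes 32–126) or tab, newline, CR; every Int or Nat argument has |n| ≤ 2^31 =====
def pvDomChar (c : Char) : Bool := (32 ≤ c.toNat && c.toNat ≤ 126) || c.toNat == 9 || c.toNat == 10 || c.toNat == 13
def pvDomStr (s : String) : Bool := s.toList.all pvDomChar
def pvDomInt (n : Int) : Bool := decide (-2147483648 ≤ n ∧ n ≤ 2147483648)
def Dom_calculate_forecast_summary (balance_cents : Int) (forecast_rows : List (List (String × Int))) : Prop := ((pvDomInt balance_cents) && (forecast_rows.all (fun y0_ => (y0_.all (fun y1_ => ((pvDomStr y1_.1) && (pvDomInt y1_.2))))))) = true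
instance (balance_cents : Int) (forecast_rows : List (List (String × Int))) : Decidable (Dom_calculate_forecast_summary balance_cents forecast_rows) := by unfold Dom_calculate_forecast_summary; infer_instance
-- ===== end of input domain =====

-- B replaces A's single four-variable accumulator loop by three independent queries
-- (last row, first negative via find, minimum via min with key); idiomatic, same O(n) cost.


-- ===== PORT A =====
-- row["k"]: the Python dict built from the row's pairs (later duplicates overwrite),
-- default 0 is only reached outside Pre_ (missing key = KeyError in Python).
def pvGet (row : List (String × Int)) (k : String) : Int :=
  ((PySem.Dict.ofList row).get? k).getD 0

-- A's loop body: state = (lowest_balance, lowest_balance_date, first_negative_date, ending_balance)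
def stepA (s : Int × Option Int × Option Int × Int) (row : List (String × Int)) :
    Int × Option Int × Option Int × Int :=
  let cur := pvGet row "balance_after"
  let low := if cur < s.1 then cur else s.1
  let lbd := if cur < s.1 then some (pvGet row "date") else s.2.1
  let fnd := if s.2.2.1 = none ∧ cur < 0 then some (pvGet row "date") else s.2.2.1
  (low, lbd, fnd, cur)

def calculate_forecast_summary (balance_cents : Int) (forecast_rows : List (List (String × Int))) : List (String × Option Int) :=
  let st := forecast_rows.foldl stepA (balance_cents, none, none, balance_cents)
  [("starting_balance", some balance_cents),
   ("lowest_balance", some st.1),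
   ("lowest_balance_date", st.2.1),
   ("ending_balance", some st.2.2.2),
   ("first_negative_date", st.2.2.1)]

-- ===== PORT B =====
def calculate_forecast_summary_alt (balance_cents : Int) (forecast_rows : List (List (String × Int))) : List (String × Option Int) :=
  -- forecast_rows[-1]["balance_after"] if forecast_rows else balance_cents
  let ending : Int :=
    match forecast_rows.getLast? with
    | some r => pvGet r "balance_after"
    | none => balance_cents
  -- next((r["date"] for r in forecast_rows if r["balance_after"] < 0), None)
  let fnd : Option Int :=
    (forecast_rows.find? (fun r => decide (pvGet r "balance_after" < 0))).map
      (fun r => pvGet r "date")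
  -- min(forecast_rows, key=lambda r: r["balance_after"]), guarded by non-emptiness
  let lowPair : Int × Option Int :=
    match PySem.List.min? forecast_rows (fun r => pvGet r "balance_after") with
    | some b =>
        if pvGet b "balance_after" < balance_cents then
          (pvGet b "balance_after", some (pvGet b "date"))
        else (balance_cents, none)
    | none => (balance_cents, none)
  [("starting_balance", some balance_cents),
   ("lowest_balance", some lowPair.1),
   ("lowest_balance_date", lowPair.2),
   ("ending_balance", some ending),
   ("first_negative_date", fnd)]

-- ===== PRECONDITION & SPEC =====
-- Pre_ is exactly where Python A returns normally: every row carries "balance_after" (else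
-- KeyError), and a row must carry "date" precisely when A looks it up — when its balance is
-- strictly below the starting balance and all earlier balances (new running minimum), or when
-- it is the first negative row.
def Pre_calculate_forecast_summary (balance_cents : Int) (forecast_rows : List (List (String × Int))) : Prop :=
  ∀ i : Fin forecast_rows.length,
    (PySem.Dict.ofList forecast_rows[i]).contains "balance_after" = true ∧
    (((pvGet forecast_rows[i] "balance_after" < balance_cents ∧
        ∀ j : Fin forecast_rows.length, j.val < i.val →
          pvGet forecast_rows[i] "balance_after" < pvGet forecast_rows[j] "balance_after") ∨
      (pvGet forecast_rows[i] "balance_after" < 0 ∧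
        ∀ j : Fin forecast_rows.length, j.val < i.val →
          0 ≤ pvGet forecast_rows[j] "balance_after")) →
      (PySem.Dict.ofList forecast_rows[i]).contains "date" = true)
instance (balance_cents : Int) (forecast_rows : List (List (String × Int))) : Decidable (Pre_calculate_forecast_summary balance_cents forecast_rows) := by unfold Pre_calculate_forecast_summary; infer_instance

def pvWitness_calculate_forecast_summary : Int × (List (List (String × Int))) :=
  (100, [[("balance_after", -5), ("date", 7)], [("balance_after", 3), ("date", 8)]])

def Spec_calculate_forecast_summary (balance_cents : Int) (forecast_rows : List (List (String × Int))) (out : List (String × Option Int)) : Prop := out = calculate_forecast_summary_alt balance_cents forecast_rows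
instance (balance_cents : Int) (forecast_rows : List (List (String × Int))) (out : List (String × Option Int)) : Decidable (Spec_calculate_forecast_summary balance_cents forecast_rows out) := by unfold Spec_calculate_forecast_summary; infer_instance

-- ===== CLAIM (what is proved, stated in full; the proofs are below) =====
def Claim_equal_calculate_forecast_summary : Prop := ∀ (balance_cents : Int) (forecast_rows : List (List (String × Int))), Dom_calculate_forecast_summary balance_cents forecast_rows → Pre_calculate_forecast_summary balance_cents forecast_rows → Spec_calculate_forecast_summary balance_cents forecast_rows (calculate_forecast_summary balance_cents forecast_rows)

-- ===== LEMMAS AND PROOFS =====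

-- ending_balance: the fold's last component is the last row's balance (or the seed).
theorem stepA_ending (rows : List (List (String × Int))) (s : Int × Option Int × Option Int × Int) :
    (rows.foldl stepA s).2.2.2 =
      (match rows.getLast? with
       | some r => pvGet r "balance_after"
       | none => s.2.2.2) := by
  induction rows generalizing s with
  | nil => rfl
  | cons r t ih =>
      simp only [List.foldl_cons, ih]
      cases t with
      | nil => rfl
      | cons x u =>
          rw [List.getLast?_cons_cons]
          cases hl : (x :: u).getLast? with
          | none => simp at hl
          | some y => rfl

-- first_negative_date: once set it is kept; from none it is the first negative row's date.
theorem stepA_fnd (rows : List (List (String × Int))) (s : Int × Option Int × Option Int × Int) :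
    (rows.foldl stepA s).2.2.1 =
      s.2.2.1.or
        ((rows.find? (fun r => decide (pvGet r "balance_after" < 0))).map
          (fun r => pvGet r "date")) := by
  induction rows generalizing s with
  | nil => simp
  | cons r t ih =>
      simp only [List.foldl_cons, ih, List.find?_cons]
      cases hs : s.2.2.1 with
      | some d => simp [stepA, hs]
      | none =>
          by_cases h : pvGet r "balance_after" < 0 <;>
            simp [stepA, hs, h]

-- min? over a cons, first-extremal tie-breaking, for our concrete key.
theorem min?_cons (x : List (String × Int)) (u : List (List (String × Int))) :
    PySem.List.min? (x :: u) (fun r => pvGet r "balance_after") =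
      some (match PySem.List.min? u (fun r => pvGet r "balance_after") with
            | none => x
            | some m => if pvGet m "balance_after" < pvGet x "balance_after" then m else x) := by
  induction u generalizing x with
  | nil => rfl
  | cons y v ih =>
      have hswap : PySem.List.min? (x :: y :: v) (fun r => pvGet r "balance_after") =
          PySem.List.min?
            ((if pvGet y "balance_after" < pvGet x "balance_after" then y else x) :: v)
            (fun r => pvGet r "balance_after") := by
        by_cases h : pvGet y "balance_after" < pvGet x "balance_after" <;>
          simp [PySem.List.min?, h]
      rw [hswap, ih, ih y]
      cases hm : PySem.List.min? v (fun r => pvGet r "balance_after") with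
      | none =>
          by_cases h : pvGet y "balance_after" < pvGet x "balance_after" <;> simp [h]
      | some m =>
          by_cases h : pvGet y "balance_after" < pvGet x "balance_after" <;>
            · simp only [h, if_true, if_false, Option.some.injEq]
              split_ifs <;> first | rfl | omega | simp_all

-- lowest_balance / lowest_balance_date: the fold's running minimum equals min? compared once.
theorem stepA_low (rows : List (List (String × Int))) (low : Int) (lbd fnd : Option Int) (e : Int) :
    ((rows.foldl stepA (low, lbd, fnd, e)).1, (rows.foldl stepA (low, lbd, fnd, e)).2.1) =
      (match PySem.List.min? rows (fun r => pvGet r "balance_after") with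
       | none => (low, lbd)
       | some b =>
           if pvGet b "balance_after" < low then
             (pvGet b "balance_after", some (pvGet b "date"))
           else (low, lbd)) := by
  induction rows generalizing low lbd fnd e with
  | nil => rfl
  | cons r t ih =>
      simp only [List.foldl_cons]
      have hstep : stepA (low, lbd, fnd, e) r =
          (if pvGet r "balance_after" < low then pvGet r "balance_after" else low,
           if pvGet r "balance_after" < low then some (pvGet r "date") else lbd,
           (if fnd = none ∧ pvGet r "balance_after" < 0 then some (pvGet r "date") else fnd),
           pvGet r "balance_after") := rfl
      rw [hstep, ih]
      rw [min?_cons r t]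
      cases hm : PySem.List.min? t (fun r => pvGet r "balance_after") with
      | none =>
          simp only [Option.some.injEq]
          split_ifs <;> simp_all
      | some m =>
          simp only [Option.some.injEq]
          split_ifs <;> simp_all <;> omega

-- ===== VERDICT (by name: the statement is the Claim_ definition above) =====
theorem calculate_forecast_summary_spec : Claim_equal_calculate_forecast_summary := by
  intro bc rows _ _
  unfold Spec_calculate_forecast_summary calculate_forecast_summary calculate_forecast_summary_alt
  have hend := stepA_ending rows (bc, none, none, bc)
  have hfnd := stepA_fnd rows (bc, none, none, bc)
  have hlow := stepA_low rows bc none none bc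
  cases hm : PySem.List.min? rows (fun r => pvGet r "balance_after") with
  | none =>
      have hrows : rows = [] := by
        rwa [PySem.List.min?_eq_none_iff] at hm
      subst hrows; rfl
  | some b =>
      rw [hm] at hlow
      by_cases hb : pvGet b "balance_after" < bc <;>
        · simp only [hb, if_true, if_false, Prod.mk.injEq] at hlow
          simp [hm, hb, hlow.1, hlow.2, hend, hfnd]
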